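-- pv_equiv track=rewrite | github.com/elidare/project-storage | advent_of_code_2023/advent_2023_22.py | tiles
-- ===== SOURCE A (Python) =====
-- def tiles(brick):
--     (xd, yd, zd), (xf, yf, zf) = brick
--     if xd < xf:
--         return [(x, yd, zd) for x in range(xd, xf + 1)]
--     if yd < yf:
--         return [(xd, y, zd) for y in range(yd, yf + 1)]
--     if zd < zf:
--         return [(xd, yd, z) for z in range(zd, zf + 1)]
--     return [(xd, yd, zd)]
-- ===== SOURCE B (Python) =====
-- def _seg(mk, lo, hi):
--     if lo == hi:
--         return [mk(lo)]
--     mid = (lo + hi) // 2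
--     return _seg(mk, lo, mid) + _seg(mk, mid + 1, hi)
--
-- def tiles(brick):
--     (xd, yd, zd), (xf, yf, zf) = brick
--     if xd < xf:
--         return _seg(lambda v: (v, yd, zd), xd, xf)
--     if yd < yf:
--         return _seg(lambda v: (xd, v, zd), yd, yf)
--     if zd < zf:
--         return _seg(lambda v: (xd, yd, v), zd, zf)
--     return [(xd, yd, zd)]
-- ===== Notes on version B (the rewrite author's own statement) =====
-- stated objective: alternative
-- what changed: B builds the tile list by recursive binary bisection of the coordinate interval (split at the floor midpoint, concatenate the two halves) instead of A's linear range enumeration.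
import Mathlib
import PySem

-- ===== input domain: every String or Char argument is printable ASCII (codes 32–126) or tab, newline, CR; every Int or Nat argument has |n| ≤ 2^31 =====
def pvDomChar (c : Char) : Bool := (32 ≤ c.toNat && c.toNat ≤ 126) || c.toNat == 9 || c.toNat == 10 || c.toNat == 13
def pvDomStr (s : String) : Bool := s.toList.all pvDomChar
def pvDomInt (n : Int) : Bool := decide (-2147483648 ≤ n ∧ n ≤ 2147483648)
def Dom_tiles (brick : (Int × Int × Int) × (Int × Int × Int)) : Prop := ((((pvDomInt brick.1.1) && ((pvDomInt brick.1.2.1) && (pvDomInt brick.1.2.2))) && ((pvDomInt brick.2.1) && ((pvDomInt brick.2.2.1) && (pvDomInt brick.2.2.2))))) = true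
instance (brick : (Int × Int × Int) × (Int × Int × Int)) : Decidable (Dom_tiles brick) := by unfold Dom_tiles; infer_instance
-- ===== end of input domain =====

-- B builds each tile list by recursive binary bisection of the coordinate interval instead of A's linear range enumeration (alternative decomposition; same cost).
-- ===== PORT A =====
def tiles (brick : (Int × Int × Int) × (Int × Int × Int)) : List (Int × Int × Int) :=
  let xd := brick.1.1; let yd := brick.1.2.1; let zd := brick.1.2.2
  let xf := brick.2.1; let yf := brick.2.2.1; let zf := brick.2.2.2
  if xd < xf then (PySem.List.pyRange xd (xf + 1) 1).map (fun x => (x, yd, zd))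
  else if yd < yf then (PySem.List.pyRange yd (yf + 1) 1).map (fun y => (xd, y, zd))
  else if zd < zf then (PySem.List.pyRange zd (zf + 1) 1).map (fun z => (xd, yd, z))
  else [(xd, yd, zd)]

-- ===== PORT B =====
-- _seg: if lo == hi a singleton, else split at mid = (lo+hi)//2 and concatenate the halves.
-- Only ever called with lo ≤ hi; the final 'else [mk lo]' is an unreachable totality guard.
def seg (mk : Int → Int × Int × Int) (lo hi : Int) : List (Int × Int × Int) :=
  if lo = hi then [mk lo]
  else if h : lo < hi then
    let mid := PySem.Int.floordiv (lo + hi) 2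
    have hlo : lo ≤ mid := (PySem.Int.floordiv_two_mid_bounds (le_of_lt h)).1
    have hhi : mid < hi := (PySem.Int.floordiv_lt_iff_lt_mul (by omega)).mpr (by omega)
    seg mk lo mid ++ seg mk (mid + 1) hi
  else [mk lo]
termination_by (hi - lo).toNat
decreasing_by
  · omega
  · omega

def tiles_alt (brick : (Int × Int × Int) × (Int × Int × Int)) : List (Int × Int × Int) :=
  let xd := brick.1.1; let yd := brick.1.2.1; let zd := brick.1.2.2
  let xf := brick.2.1; let yf := brick.2.2.1; let zf := brick.2.2.2
  if xd < xf then seg (fun v => (v, yd, zd)) xd xf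
  else if yd < yf then seg (fun v => (xd, v, zd)) yd yf
  else if zd < zf then seg (fun v => (xd, yd, v)) zd zf
  else [(xd, yd, zd)]

-- ===== PRECONDITION & SPEC =====
def Spec_tiles (brick : (Int × Int × Int) × (Int × Int × Int)) (out : List (Int × Int × Int)) : Prop := out = tiles_alt brick
instance (brick : (Int × Int × Int) × (Int × Int × Int)) (out : List (Int × Int × Int)) : Decidable (Spec_tiles brick out) := by unfold Spec_tiles; infer_instance

-- ===== CLAIM (what is proved, stated in full; the proofs are below) =====
def Claim_equal_tiles : Prop := ∀ (brick : (Int × Int × Int) × (Int × Int × Int)), Dom_tiles brick → Spec_tiles brick (tiles brick)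

-- ===== LEMMAS AND PROOFS =====
theorem seg_eq (mk : Int → Int × Int × Int) (lo hi : Int) (hle : lo ≤ hi) :
    seg mk lo hi = (PySem.List.pyRange lo (hi + 1) 1).map mk := by
  induction lo, hi using seg.induct with
  | case1 hi =>
    rw [seg, if_pos rfl, PySem.List.pyRange_one_singleton]
    rfl
  | case2 lo hi hne h mid hlo hhi ih1 ih2 =>
    rw [seg, if_neg hne, dif_pos h]
    show seg mk lo mid ++ seg mk (mid + 1) hi = _
    rw [ih1 hlo, ih2 (by omega),
        PySem.List.pyRange_one_append lo (mid + 1) (hi + 1) (by omega) (by omega),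
        List.map_append]
  | case3 lo hi hne h => omega

-- ===== VERDICT (by name: the statement is the Claim_ definition above) =====
theorem tiles_spec : Claim_equal_tiles := by
  intro brick _
  obtain ⟨⟨xd, yd, zd⟩, ⟨xf, yf, zf⟩⟩ := brick
  unfold Spec_tiles tiles tiles_alt
  simp only
  split_ifs with h1 h2 h3
  · rw [seg_eq _ _ _ (le_of_lt h1)]
  · rw [seg_eq _ _ _ (le_of_lt h2)]
  · rw [seg_eq _ _ _ (le_of_lt h3)]
  · rfl
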